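-- pv_equiv track=rewrite | github.com/st7ma784/LorenzEnigmaLSALearning | enhanced_rotor_stepping_training.py | _extract_lorenz_mask
-- ===== SOURCE A (Python) =====
-- from typing import List, Dict, Tuple, Optional
--
-- def _extract_lorenz_mask(plaintext: str, ciphertext: str) -> List[int]:
--     """Extract Lorenz XOR mask with enhanced processing"""
--
--     # Convert to 5-bit binary representation
--     def text_to_binary_enhanced(text):
--         binary = []
--         for char in text.upper():
--             if char in 'ABCDEFGHIJKLMNOPQRSTUVWXYZ':
--                 val = ord(char) - ord('A')
--                 # 5-bit representation with parity bit
--                 bits = [int(b) for b in format(val, '05b')]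
--                 parity = sum(bits) % 2
--                 binary.extend(bits + [parity])  # 6 bits total
--         return binary
--
--     plain_binary = text_to_binary_enhanced(plaintext)
--     cipher_binary = text_to_binary_enhanced(ciphertext)
--
--     # XOR to create mask
--     min_len = min(len(plain_binary), len(cipher_binary))
--     mask = [plain_binary[i] ^ cipher_binary[i] for i in range(min_len)]
--
--     return mask
-- ===== SOURCE B (Python) =====
-- def _extract_lorenz_mask(plaintext: str, ciphertext: str) -> list:
--     """Single pass over zipped letter pairs: XOR the 5-bit values first, then emit
--     bits + parity once per pair (parity is linear over XOR)."""
--     letters = 'ABCDEFGHIJKLMNOPQRSTUVWXYZ'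
--     p_vals = [ord(ch) - 65 for ch in plaintext.upper() if ch in letters]
--     c_vals = [ord(ch) - 65 for ch in ciphertext.upper() if ch in letters]
--     mask = []
--     for a, b in zip(p_vals, c_vals):
--         v = a ^ b
--         bits = [(v >> k) & 1 for k in (4, 3, 2, 1, 0)]
--         mask += bits + [sum(bits) % 2]
--     return mask
-- ===== Notes on version B (the rewrite author's own statement) =====
-- stated objective: faster
-- what changed: Instead of building two full 6-bit-per-letter binary arrays and XORing them index-by-index up to the shorter length, B filters each string to its letter values, zips the value lists, and for each pair emits the 6-bit block of the XORed value directly (parity is linear over XOR); only min(count) pairs are encoded and the separate XOR pass disappears.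
import Mathlib
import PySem

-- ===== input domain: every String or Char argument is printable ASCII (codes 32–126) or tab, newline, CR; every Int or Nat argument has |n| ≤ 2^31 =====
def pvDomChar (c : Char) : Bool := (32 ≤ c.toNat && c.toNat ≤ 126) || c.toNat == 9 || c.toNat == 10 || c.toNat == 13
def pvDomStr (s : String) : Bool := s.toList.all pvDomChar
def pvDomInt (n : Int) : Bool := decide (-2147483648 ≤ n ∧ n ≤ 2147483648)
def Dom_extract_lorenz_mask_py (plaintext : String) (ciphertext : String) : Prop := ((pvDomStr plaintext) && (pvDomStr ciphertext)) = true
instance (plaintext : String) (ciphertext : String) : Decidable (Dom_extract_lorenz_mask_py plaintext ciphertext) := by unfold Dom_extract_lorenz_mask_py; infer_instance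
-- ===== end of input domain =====

-- B replaces A's build-two-binary-arrays-then-XOR passes by one pass over zipped letter-value
-- pairs, emitting the 6-bit block of the XORed value directly (alternative decomposition).


-- ===== PORT A =====
-- the membership test "char in 'ABCDEFGHIJKLMNOPQRSTUVWXYZ'": the literal's char list
def pvLetters : List Char :=
  ['A','B','C','D','E','F','G','H','I','J','K','L','M','N','O','P','Q','R','S','T','U','V','W','X','Y','Z']

-- [int(b) for b in format(val, '05b')] — exact for 0 ≤ val < 32 (the only vals A reaches)
def pvBits5 (val : Int) : List Int :=
  [PySem.Int.mod (PySem.Int.floordiv val 16) 2,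
   PySem.Int.mod (PySem.Int.floordiv val 8) 2,
   PySem.Int.mod (PySem.Int.floordiv val 4) 2,
   PySem.Int.mod (PySem.Int.floordiv val 2) 2,
   PySem.Int.mod val 2]

-- body of the for-loop for an accepted char: bits + [parity]
def pvEncVal (val : Int) : List Int :=
  let bits := pvBits5 val
  bits ++ [PySem.Int.mod bits.sum 2]

-- text_to_binary_enhanced
def pvText2Bin (text : String) : List Int :=
  (PySem.Str.upper text).toList.foldl
    (fun binary ch =>
      if pvLetters.contains ch then
        binary ++ pvEncVal ((ch.toNat : Int) - 65)
      else binary) []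

def extract_lorenz_mask_py (plaintext : String) (ciphertext : String) : List Int :=
  let plain_binary := pvText2Bin plaintext
  let cipher_binary := pvText2Bin ciphertext
  let min_len := min plain_binary.length cipher_binary.length
  (List.range min_len).map
    (fun (i : Nat) => PySem.Int.bxor (PySem.List.pyGetD plain_binary (i : Int) 0) (PySem.List.pyGetD cipher_binary (i : Int) 0))

-- ===== PORT B =====
-- [ord(ch) - 65 for ch in text.upper() if ch in letters]
def pvVals (text : String) : List Int :=
  ((PySem.Str.upper text).toList.filter (fun ch => pvLetters.contains ch)).map
    (fun ch => (ch.toNat : Int) - 65)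

-- bits of v as shifts, then parity from the bit list, as in Source B
def pvBlockB (v : Int) : List Int :=
  let bits := [PySem.Int.band (v >>> (4:Nat)) 1, PySem.Int.band (v >>> (3:Nat)) 1,
               PySem.Int.band (v >>> (2:Nat)) 1, PySem.Int.band (v >>> (1:Nat)) 1,
               PySem.Int.band (v >>> (0:Nat)) 1]
  bits ++ [PySem.Int.mod bits.sum 2]

def extract_lorenz_mask_py_alt (plaintext : String) (ciphertext : String) : List Int :=
  (List.zip (pvVals plaintext) (pvVals ciphertext)).foldl
    (fun mask ab => mask ++ pvBlockB (PySem.Int.bxor ab.1 ab.2)) []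

-- ===== PRECONDITION & SPEC =====
def Spec_extract_lorenz_mask_py (plaintext : String) (ciphertext : String) (out : List Int) : Prop := out = extract_lorenz_mask_py_alt plaintext ciphertext
instance (plaintext : String) (ciphertext : String) (out : List Int) : Decidable (Spec_extract_lorenz_mask_py plaintext ciphertext out) := by unfold Spec_extract_lorenz_mask_py; infer_instance

-- ===== CLAIM (what is proved, stated in full; the proofs are below) =====
def Claim_equal_extract_lorenz_mask_py : Prop := ∀ (plaintext : String) (ciphertext : String), Dom_extract_lorenz_mask_py plaintext ciphertext → Spec_extract_lorenz_mask_py plaintext ciphertext (extract_lorenz_mask_py plaintext ciphertext)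

-- ===== LEMMAS AND PROOFS =====

-- every letter value is in [0, 26)
set_option maxRecDepth 2000 in
lemma pvVals_bound {t : String} {v : Int} (hv : v ∈ pvVals t) : 0 ≤ v ∧ v < 26 := by
  simp only [pvVals, List.mem_map, List.mem_filter] at hv
  obtain ⟨ch, ⟨_, hch⟩, rfl⟩ := hv
  have : ∀ c ∈ pvLetters, 65 ≤ c.toNat ∧ c.toNat ≤ 90 := by
    intro c hc
    fin_cases hc <;> decide
  have h := this ch (by simpa using hch)
  omega

-- 'if p(x): out.extend(g(x))' loop shape
lemma pvFoldl_if_append {α β : Type} (p : α → Bool) (g : α → List β) :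
    ∀ (l : List α) (acc : List β),
      l.foldl (fun acc x => if p x then acc ++ g x else acc) acc
        = acc ++ (l.filter p).flatMap g := by
  intro l
  induction l with
  | nil => simp
  | cons x l ih =>
    intro acc
    by_cases h : p x <;> simp [List.foldl_cons, h, ih]

-- A's per-string pass equals flatMap of the per-value block over the filtered values
lemma pvText2Bin_eq (t : String) : pvText2Bin t = (pvVals t).flatMap pvEncVal := by
  unfold pvText2Bin pvVals
  rw [pvFoldl_if_append, List.nil_append, List.flatMap_map]

-- A's index loop over range(min) is zipWith xor
lemma pvMask_eq_zipWith (xs ys : List Int) :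
    (List.range (min xs.length ys.length)).map
      (fun (i : Nat) => PySem.Int.bxor (PySem.List.pyGetD xs (i : Int) 0) (PySem.List.pyGetD ys (i : Int) 0))
    = List.zipWith PySem.Int.bxor xs ys := by
  apply List.ext_getElem
  · simp
  · intro i h1 h2
    simp only [List.getElem_map, List.getElem_range, List.getElem_zipWith,
      PySem.List.pyGetD_natCast]
    simp at h1
    rw [List.getD_eq_getElem _ _ (by omega), List.getD_eq_getElem _ _ (by omega)]

-- the 6-bit blocks XOR pointwise to the block of the XORed value (676 bounded cases)
set_option maxRecDepth 4000 in
set_option maxHeartbeats 1000000 in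
lemma pvBlock_xor : ∀ a < 26, ∀ b < 26,
    List.zipWith PySem.Int.bxor (pvEncVal ((a : Nat) : Int)) (pvEncVal ((b : Nat) : Int))
      = pvBlockB (PySem.Int.bxor ((a : Nat) : Int) ((b : Nat) : Int)) := by decide

lemma pvBlock_xor' {a b : Int} (ha : 0 ≤ a ∧ a < 26) (hb : 0 ≤ b ∧ b < 26) :
    List.zipWith PySem.Int.bxor (pvEncVal a) (pvEncVal b) = pvBlockB (PySem.Int.bxor a b) := by
  obtain ⟨m, rfl⟩ := Int.eq_ofNat_of_zero_le ha.1
  obtain ⟨n, rfl⟩ := Int.eq_ofNat_of_zero_le hb.1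
  exact pvBlock_xor m (by exact_mod_cast ha.2) n (by exact_mod_cast hb.2)

lemma pvEncVal_length (v : Int) : (pvEncVal v).length = 6 := by rfl

-- zipWith over concatenated equal-length blocks = flatMap over zipped pairs
lemma pvZip_flatMap : ∀ (P C : List Int),
    (∀ v ∈ P, 0 ≤ v ∧ v < 26) → (∀ v ∈ C, 0 ≤ v ∧ v < 26) →
    List.zipWith PySem.Int.bxor (P.flatMap pvEncVal) (C.flatMap pvEncVal)
      = (List.zip P C).flatMap (fun ab => pvBlockB (PySem.Int.bxor ab.1 ab.2)) := by
  intro P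
  induction P with
  | nil => intro C _ _; simp
  | cons a P ih =>
    intro C hP hC
    cases C with
    | nil => simp
    | cons b C =>
      simp only [List.flatMap_cons, List.zip_cons_cons]
      rw [List.zipWith_append (by rw [pvEncVal_length, pvEncVal_length])]
      rw [pvBlock_xor' (hP a (by simp)) (hC b (by simp)),
        ih C (fun v hv => hP v (by simp [hv])) (fun v hv => hC v (by simp [hv]))]

-- ===== VERDICT (by name: the statement is the Claim_ definition above) =====
theorem extract_lorenz_mask_py_spec : Claim_equal_extract_lorenz_mask_py := by
  intro p c _
  unfold Spec_extract_lorenz_mask_py extract_lorenz_mask_py extract_lorenz_mask_py_alt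
  rw [PySem.List.foldl_append_eq_flatMap, List.nil_append]
  simp only [pvText2Bin_eq, pvMask_eq_zipWith]
  exact pvZip_flatMap _ _ (fun v hv => pvVals_bound hv) (fun v hv => pvVals_bound hv)
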